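-- pv_equiv track=rewrite | github.com/qzx997/klynx_skills | skills/circuit-design-ngspice/scripts/auto_tune_netlist.py | parse_param_assignments
-- ===== SOURCE A (Python) =====
-- def parse_param_assignments(netlist_text: str) -> dict[str, str]:
--     values: dict[str, str] = {}
--     for line in netlist_text.splitlines():
--         stripped = line.strip()
--         if not stripped.lower().startswith(".param"):
--             continue
--         body = stripped[6:].strip()
--         for token in body.split():
--             if "=" not in token:
--                 continue
--             name, value = token.split("=", 1)
--             name = name.strip()
--             value = value.strip()
--             if name:
--                 values[name] = value
--     return values
-- ===== SOURCE B (Python) =====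
-- def parse_param_assignments(netlist_text: str) -> dict[str, str]:
--     # Single index-based scan of each line: no intermediate strip/lower copies
--     # and no token lists -- names/values are cut directly out of the line.
--     values: dict[str, str] = {}
--     for line in netlist_text.splitlines():
--         n = len(line)
--         i = 0
--         while i < n and line[i].isspace():
--             i += 1
--         if line[i:i + 6].lower() != ".param":
--             continue
--         i += 6
--         while i < n:
--             while i < n and line[i].isspace():
--                 i += 1
--             start = i
--             eq = -1
--             while i < n and not line[i].isspace():
--                 if eq < 0 and line[i] == "=":
--                     eq = i
--                 i += 1
--             if eq > start:
--                 values[line[start:eq]] = line[eq + 1:i]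
--     return values
-- ===== Notes on version B (the rewrite author's own statement) =====
-- stated objective: alternative
-- what changed: A's per-line pipeline of strip/lower/startswith plus split() and split('=',1) with temporary strings and token lists is replaced by a single index-based scan of each line that checks the '.param' prefix in place and slices each name/value pair directly out of the line.
import Mathlib
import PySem

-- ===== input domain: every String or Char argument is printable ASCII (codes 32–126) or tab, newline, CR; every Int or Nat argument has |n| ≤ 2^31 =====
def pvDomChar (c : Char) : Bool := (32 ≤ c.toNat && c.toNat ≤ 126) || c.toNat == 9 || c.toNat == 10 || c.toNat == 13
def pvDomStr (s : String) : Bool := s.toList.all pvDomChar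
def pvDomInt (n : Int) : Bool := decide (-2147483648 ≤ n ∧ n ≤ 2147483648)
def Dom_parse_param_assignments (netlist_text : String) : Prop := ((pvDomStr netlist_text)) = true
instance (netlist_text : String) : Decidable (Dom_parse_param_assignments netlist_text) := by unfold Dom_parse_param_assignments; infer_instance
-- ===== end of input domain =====

-- B replaces A's strip/lower/startswith/split/split pipeline by a single index-style scan of each
-- line that cuts names and values directly out of it (objective: alternative, fewer intermediate
-- allocations; equal return value proved below).

-- ===== PORT A =====
-- literal transliteration of A: splitlines, strip, lower().startswith, [6:].strip().split(),
-- token.split("=", 1), dict assignment.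
def parse_param_assignments (netlist_text : String) : List (String × String) :=
  ((PySem.Str.splitlines netlist_text).foldl (fun (values : PySem.Dict String String) line =>
      let stripped := PySem.Str.strip line
      if !(PySem.Str.startswith (PySem.Str.lower stripped) ".param") then values
      else
        let body := PySem.Str.strip (PySem.Str.slice stripped (some 6) none)
        (PySem.Str.split₀ body).foldl (fun values token =>
          if !(PySem.Str.isIn "=" token) then values
          else
            match PySem.Str.splitMax? token "=" 1 with
            | some [name, value] =>
                let name := PySem.Str.strip name
                let value := PySem.Str.strip value
                if name ≠ "" then values.insert name value else values
            | _ => values)  -- unreachable: split(sep, 1) with sep present yields exactly two pieces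
          values)
    PySem.Dict.empty).items

-- ===== PORT B =====
-- B's inner while-loop over indices, ported as the same left-to-right scan over the line's
-- character list: skip whitespace, cut the token, cut it at its first '=', insert, continue.
def pvAltTokens (values : PySem.Dict String String) : List Char → PySem.Dict String String
  | [] => values
  | c :: cs =>
    if PySem.Chars.isspace c then pvAltTokens values cs
    else
      let tokTail := cs.takeWhile (fun x => !PySem.Chars.isspace x)
      let tok := c :: tokTail
      let name := tok.takeWhile (fun x => x ≠ '=')
      let values' :=
        if name.length < tok.length && !name.isEmpty then
          values.insert (String.ofList name) (String.ofList (tok.drop (name.length + 1)))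
        else values
      pvAltTokens values' (cs.drop tokTail.length)
  termination_by cs => cs.length

def parse_param_assignments_alt (netlist_text : String) : List (String × String) :=
  ((PySem.Str.splitlines netlist_text).foldl (fun values line =>
      let cs := line.toList.dropWhile PySem.Chars.isspace
      if PySem.Chars.lower (cs.take 6) = ".param".toList then pvAltTokens values (cs.drop 6)
      else values)
    PySem.Dict.empty).items

-- ===== PRECONDITION & SPEC =====
def Spec_parse_param_assignments (netlist_text : String) (out : List (String × String)) : Prop := out = parse_param_assignments_alt netlist_text
instance (netlist_text : String) (out : List (String × String)) : Decidable (Spec_parse_param_assignments netlist_text out) := by unfold Spec_parse_param_assignments; infer_instance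

-- ===== CLAIM (what is proved, stated in full; the proofs are below) =====
def Claim_equal_parse_param_assignments : Prop := ∀ (netlist_text : String), Dom_parse_param_assignments netlist_text → Spec_parse_param_assignments netlist_text (parse_param_assignments netlist_text)

-- ===== LEMMAS AND PROOFS =====

-- the whitespace-separated words of a character list, by the scan B performs
def pvToks : List Char → List (List Char)
  | [] => []
  | c :: cs =>
    if PySem.Chars.isspace c then pvToks cs
    else (c :: cs.takeWhile (fun x => !PySem.Chars.isspace x)) ::
      pvToks (cs.drop (cs.takeWhile (fun x => !PySem.Chars.isspace x)).length)
  termination_by cs => cs.length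

-- B's per-token action, extracted
def pvStepB (values : PySem.Dict String String) (tok : List Char) : PySem.Dict String String :=
  let name := tok.takeWhile (fun x => x ≠ '=')
  if name.length < tok.length && !name.isEmpty then
    values.insert (String.ofList name) (String.ofList (tok.drop (name.length + 1)))
  else values

-- A's per-token action, extracted
def pvStepA (values : PySem.Dict String String) (token : String) : PySem.Dict String String :=
  if !(PySem.Str.isIn "=" token) then values
  else
    match PySem.Str.splitMax? token "=" 1 with
    | some [name, value] =>
        let name := PySem.Str.strip name
        let value := PySem.Str.strip value
        if name ≠ "" then values.insert name value else values
    | _ => values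

theorem pvAltTokens_eq_foldl (cs : List Char) : ∀ (v : PySem.Dict String String),
    pvAltTokens v cs = (pvToks cs).foldl pvStepB v := by
  induction cs using pvToks.induct with
  | case1 => intro v; rw [pvAltTokens, pvToks]; rfl
  | case2 c cs hc ih => intro v; rw [pvAltTokens, if_pos hc, pvToks, if_pos hc]; exact ih v
  | case3 c cs hc ih =>
    intro v
    rw [pvAltTokens, if_neg hc, pvToks, if_neg hc, List.foldl_cons]
    exact ih _

theorem pvSplit0_go_spec (l : List Char) : ∀ (cur : List Char) (accs : List (List Char)),
    PySem.Chars.split₀.go l cur accs = accs.reverse ++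
      (if cur.isEmpty then pvToks l
       else (cur.reverse ++ l.takeWhile (fun x => !PySem.Chars.isspace x)) ::
         pvToks (l.drop (l.takeWhile (fun x => !PySem.Chars.isspace x)).length)) := by
  induction l with
  | nil =>
    intro cur accs
    by_cases h : cur.isEmpty <;> simp [PySem.Chars.split₀.go, pvToks, h]
  | cons c rest ih =>
    intro cur accs
    by_cases hc : PySem.Chars.isspace c
    · by_cases hcur : cur.isEmpty
      · simp only [PySem.Chars.split₀.go, hc, if_true, hcur, ih]
        simp [pvToks, hc]
      · simp only [PySem.Chars.split₀.go, hc, if_true, hcur, ih]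
        simp [pvToks, hc]
    · simp only [PySem.Chars.split₀.go, hc, ih]
      by_cases hcur : cur.isEmpty
      · simp_all [pvToks, List.isEmpty_iff]
      · simp [hc, hcur]

theorem pvSplit0_eq (cs : List Char) : PySem.Chars.split₀ cs = pvToks cs := by
  unfold PySem.Chars.split₀
  rw [pvSplit0_go_spec]
  simp

theorem pvDropWhile_id {α : Type} (p : α → Bool) (l : List α) (h : ∀ c ∈ l, p c = false) :
    l.dropWhile p = l := by
  cases l with
  | nil => rfl
  | cons c t => rw [List.dropWhile_cons, if_neg (by simp [h c (by simp)])]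

theorem pvToks_all_ws (w : List Char) (hw : ∀ c ∈ w, PySem.Chars.isspace c = true) :
    pvToks w = [] := by
  induction w with
  | nil => simp [pvToks]
  | cons c t ih =>
    rw [pvToks, if_pos (hw c (by simp))]
    exact ih (fun x hx => hw x (by simp [hx]))

theorem pvToks_append_ws (w : List Char) (hw : ∀ c ∈ w, PySem.Chars.isspace c = true)
    (cs : List Char) : pvToks (cs ++ w) = pvToks cs := by
  induction cs using pvToks.induct with
  | case1 => simpa [pvToks] using pvToks_all_ws w hw
  | case2 c cs hc ih => simpa [pvToks, hc] using ih
  | case3 c cs hc ih =>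
    have htww : w.takeWhile (fun x => !PySem.Chars.isspace x) = [] := by
      cases w with
      | nil => rfl
      | cons d t => simp [hw d (by simp)]
    rw [List.cons_append, pvToks, if_neg hc, pvToks, if_neg hc, List.takeWhile_append]
    by_cases hall : (cs.takeWhile (fun x => !PySem.Chars.isspace x)).length = cs.length
    · have heq : cs.takeWhile (fun x => !PySem.Chars.isspace x) = cs :=
        (List.takeWhile_prefix _).eq_of_length hall
      rw [if_pos hall, htww, List.append_nil, heq, List.drop_left,
        pvToks_all_ws w hw, List.drop_length, pvToks]
    · have hle : (cs.takeWhile (fun x => !PySem.Chars.isspace x)).length ≤ cs.length :=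
        (List.takeWhile_prefix _).length_le
      rw [if_neg hall, List.drop_append_of_le_length hle, ih]

theorem pvToks_dropWhile (cs : List Char) :
    pvToks (cs.dropWhile PySem.Chars.isspace) = pvToks cs := by
  induction cs with
  | nil => simp
  | cons c t ih =>
    by_cases h : PySem.Chars.isspace c
    · rw [List.dropWhile_cons, if_pos h, ih, pvToks, if_pos h]
    · rw [List.dropWhile_cons, if_neg h]

theorem pvRstrip_decomp (cs : List Char) :
    PySem.Chars.rstrip cs ++ (cs.reverse.takeWhile PySem.Chars.isspace).reverse = cs := by
  unfold PySem.Chars.rstrip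
  rw [← List.reverse_append, List.takeWhile_append_dropWhile, List.reverse_reverse]

theorem pvToks_strip (cs : List Char) : pvToks (PySem.Chars.strip cs) = pvToks cs := by
  have hw : ∀ c ∈ ((cs.dropWhile PySem.Chars.isspace).reverse.takeWhile PySem.Chars.isspace).reverse,
      PySem.Chars.isspace c = true := by
    intro c hc
    exact List.mem_takeWhile_imp (by simpa using hc)
  calc pvToks (PySem.Chars.strip cs)
      = pvToks (PySem.Chars.rstrip (cs.dropWhile PySem.Chars.isspace) ++
          ((cs.dropWhile PySem.Chars.isspace).reverse.takeWhile PySem.Chars.isspace).reverse) := by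
        rw [pvToks_append_ws _ hw]; rfl
    _ = pvToks cs := by rw [pvRstrip_decomp, pvToks_dropWhile]

theorem pvStrip_id (cs : List Char) (h : ∀ c ∈ cs, PySem.Chars.isspace c = false) :
    PySem.Chars.strip cs = cs := by
  unfold PySem.Chars.strip PySem.Chars.lstrip PySem.Chars.rstrip
  rw [pvDropWhile_id _ _ h, pvDropWhile_id _ _ (fun c hc => h c (by simpa using hc)),
    List.reverse_reverse]

theorem pvToks_mem (cs : List Char) : ∀ tok ∈ pvToks cs,
    ∀ c ∈ tok, PySem.Chars.isspace c = false := by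
  induction cs using pvToks.induct with
  | case1 => simp [pvToks]
  | case2 c cs hc ih => simpa [pvToks, hc] using ih
  | case3 c cs hc ih =>
    intro tok htok
    rw [pvToks, if_neg hc] at htok
    rcases List.mem_cons.mp htok with h | h
    · subst h
      intro x hx
      rcases List.mem_cons.mp hx with h2 | h2
      · subst h2; simpa using hc
      · have h3 := List.mem_takeWhile_imp h2; rwa [Bool.not_eq_eq_eq_not, Bool.not_true] at h3
    · exact ih tok h

theorem pvGo_m0 (sep : List Char) (fuel : Nat) (l cur : List Char) (acc : List (List Char)) :
    PySem.Chars.splitOnMax.go sep fuel 0 l cur acc = acc.reverse ++ [cur.reverse ++ l] := by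
  cases fuel with
  | zero => simp [PySem.Chars.splitOnMax.go]
  | succ f => cases l with
    | nil => simp [PySem.Chars.splitOnMax.go]
    | cons c t => simp [PySem.Chars.splitOnMax.go]

theorem pvGo_m1 (l : List Char) : ∀ (fuel : Nat) (cur : List Char) (acc : List (List Char)),
    l.length < fuel →
    PySem.Chars.splitOnMax.go ['='] fuel 1 l cur acc =
      if '=' ∈ l then
        acc.reverse ++ [cur.reverse ++ l.takeWhile (fun x => x ≠ '='),
          l.drop ((l.takeWhile (fun x => x ≠ '=')).length + 1)]
      else acc.reverse ++ [cur.reverse ++ l] := by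
  induction l with
  | nil =>
    intro fuel cur acc hf
    match fuel, hf with
    | fuel + 1, _ => simp [PySem.Chars.splitOnMax.go]
  | cons c t ih =>
    intro fuel cur acc hf
    match fuel, hf with
    | fuel + 1, hf2 =>
      by_cases hc : c = '='
      · subst hc
        simp only [PySem.Chars.splitOnMax.go]
        rw [if_neg (by omega), if_pos (by simp [List.isPrefixOf]), pvGo_m0]
        simp
      · simp only [PySem.Chars.splitOnMax.go]
        rw [if_neg (by omega), if_neg (by simp [List.isPrefixOf]; exact fun h => hc h.symm)]
        rw [ih fuel (c :: cur) acc (by simp only [List.length_cons] at hf2; omega)]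
        by_cases hm : '=' ∈ t
        · rw [if_pos hm, if_pos (by simp [hm])]
          simp [hc]
        · rw [if_neg hm, if_neg (by simp [hm]; exact fun h => hc h.symm)]
          simp

theorem pvSplitOnMax_eq (l : List Char) (h : '=' ∈ l) :
    PySem.Chars.splitOnMax l ['='] 1 =
      [l.takeWhile (fun x => x ≠ '='), l.drop ((l.takeWhile (fun x => x ≠ '=')).length + 1)] := by
  unfold PySem.Chars.splitOnMax
  rw [if_neg (by omega), show (1:Int).toNat = 1 from rfl,
    pvGo_m1 l (l.length + 1) [] [] (by omega), if_pos h]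
  simp

theorem pvStepA_eq_pvStepB (v : PySem.Dict String String) (tok : List Char)
    (hws : ∀ c ∈ tok, PySem.Chars.isspace c = false) :
    pvStepA v (String.ofList tok) = pvStepB v tok := by
  by_cases hm : '=' ∈ tok
  · have hin : PySem.Str.isIn "=" (String.ofList tok) = true := by
      unfold PySem.Str.isIn
      rw [String.toList_ofList, PySem.Chars.isIn_iff_infix]
      exact (List.singleton_infix_iff _ _).mpr (by simpa using hm)
    have hlt : (tok.takeWhile (fun x => x ≠ '=')).length < tok.length := by
      rcases Nat.lt_or_ge (tok.takeWhile (fun x => x ≠ '=')).length tok.length with h | h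
      · exact h
      · exfalso
        have heq : tok.takeWhile (fun x => x ≠ '=') = tok :=
          (List.takeWhile_prefix _).eq_of_length
            (Nat.le_antisymm (List.takeWhile_prefix _).length_le h)
        have := List.mem_takeWhile_imp (x := '=') (by rw [heq]; exact hm)
        simp at this
    have hsplit : PySem.Str.splitMax? (String.ofList tok) "=" 1 =
        some [String.ofList (tok.takeWhile (fun x => x ≠ '=')),
              String.ofList (tok.drop ((tok.takeWhile (fun x => x ≠ '=')).length + 1))] := by
      unfold PySem.Str.splitMax? PySem.Chars.splitMax?
      simp only [String.toList_ofList, show "=".toList = ['='] from rfl]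
      rw [if_neg (by simp), pvSplitOnMax_eq tok hm]
      rfl
    have hstripn : PySem.Str.strip (String.ofList (tok.takeWhile (fun x => x ≠ '='))) =
        String.ofList (tok.takeWhile (fun x => x ≠ '=')) := by
      unfold PySem.Str.strip
      rw [String.toList_ofList,
        pvStrip_id _ (fun c hc => hws c ((List.takeWhile_prefix _).subset hc))]
    have hstripv : PySem.Str.strip (String.ofList
          (tok.drop ((tok.takeWhile (fun x => x ≠ '=')).length + 1))) =
        String.ofList (tok.drop ((tok.takeWhile (fun x => x ≠ '=')).length + 1)) := by
      unfold PySem.Str.strip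
      rw [String.toList_ofList, pvStrip_id _ (fun c hc => hws c (List.mem_of_mem_drop hc))]
    unfold pvStepA pvStepB
    rw [hin, hsplit]
    simp only [Bool.not_true, Bool.false_eq_true, if_false, hstripn, hstripv]
    by_cases hemp : tok.takeWhile (fun x => x ≠ '=') = []
    · rw [hemp]
      rw [if_neg (by simp), if_neg (by simp)]
    · rw [if_pos (fun h => hemp (by
        have := congrArg String.toList h; simpa using this)),
        if_pos (by rw [Bool.and_eq_true]
                   refine ⟨by simpa using hlt, ?_⟩
                   cases h : List.takeWhile (fun x => x ≠ '=') tok with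
                   | nil => exact absurd h hemp
                   | cons a l => simp)]
  · have hin : PySem.Str.isIn "=" (String.ofList tok) = false := by
      unfold PySem.Str.isIn
      rw [String.toList_ofList]
      rw [PySem.Chars.isIn_eq_false_iff]
      intro hinf
      exact hm (by simpa using (List.singleton_infix_iff _ _).mp hinf)
    have hall : tok.takeWhile (fun x => x ≠ '=') = tok :=
      List.takeWhile_eq_self_iff.mpr (fun a ha => by
        by_cases h : a = '='
        · exact absurd (h ▸ ha) hm
        · simp [h])
    unfold pvStepA pvStepB
    rw [hin]
    simp only [Bool.not_false, if_true, hall]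
    rw [if_neg (by simp)]

theorem pvLowerChar_ws (c : Char) (h : PySem.Chars.isspace c = true) :
    PySem.Chars.lowerChar c = c := by
  unfold PySem.Chars.lowerChar
  rw [if_neg]
  unfold PySem.Chars.isspace at h
  unfold PySem.Chars.isupper
  simp only [Bool.or_eq_true, Bool.and_eq_true, decide_eq_true_eq, Char.le_def] at h ⊢
  intro hup
  rcases hup with ⟨h1, h2⟩
  simp only [UInt32.le_iff_toNat_le] at h1 h2
  have e1 : ('A').val.toNat = 65 := rfl
  have e2 : ('Z').val.toNat = 90 := rfl
  have : c.toNat = c.val.toNat := rfl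
  omega

theorem pvCond_eq (cs : List Char) :
    PySem.Chars.startswith (PySem.Chars.lower (PySem.Chars.strip cs)) ".param".toList =
      decide (PySem.Chars.lower ((cs.dropWhile PySem.Chars.isspace).take 6) = ".param".toList) := by
  have hP : (".param".toList).length = 6 := rfl
  set L := cs.dropWhile PySem.Chars.isspace with hLdef
  set S := PySem.Chars.rstrip L with hSdef
  set W := (L.reverse.takeWhile PySem.Chars.isspace).reverse with hWdef
  have hLW : S ++ W = L := pvRstrip_decomp L
  have hwW : ∀ c ∈ W, PySem.Chars.isspace c = true := by
    intro c hc
    exact List.mem_takeWhile_imp (by simpa [hWdef] using hc)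
  have hstrip : PySem.Chars.strip cs = S := rfl
  rw [hstrip, Bool.eq_iff_iff, PySem.Chars.startswith_iff, decide_eq_true_iff]
  unfold PySem.Chars.lower
  constructor
  · intro h
    have h6 : 6 ≤ S.length := by simpa [hP] using h.length_le
    have htake : L.take 6 = S.take 6 := by
      rw [← hLW, List.take_append_of_le_length h6]
    rw [htake, List.map_take]
    rw [List.prefix_iff_eq_take, hP] at h
    exact h.symm
  · intro h
    by_cases h6 : 6 ≤ S.length
    · have htake : L.take 6 = S.take 6 := by
        rw [← hLW, List.take_append_of_le_length h6]
      rw [List.prefix_iff_eq_take, hP, ← List.map_take, ← htake, List.map_take]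
      rw [List.map_take] at h
      exact h.symm
    · exfalso
      have h6' : S.length < 6 := by omega
      have hPL : ".param".toList = (L.map PySem.Chars.lowerChar).take 6 := by
        rw [← List.map_take, h]
      cases hW : W with
      | nil =>
        have : L = S := by rw [← hLW, hW, List.append_nil]
        have hlen := congrArg List.length hPL
        simp [this] at hlen
        omega
      | cons w W' =>
        have hwsp : PySem.Chars.isspace w = true := hwW w (by rw [hW]; simp)
        have hmem : PySem.Chars.lowerChar w ∈ ".param".toList := by
          rw [hPL, ← hLW, hW, List.map_append, List.take_append]
          have hlen : (S.map PySem.Chars.lowerChar).length = S.length := by simp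
          have : 0 < 6 - (S.map PySem.Chars.lowerChar).length := by omega
          apply List.mem_append_right
          rw [List.map_cons]
          cases h' : 6 - (S.map PySem.Chars.lowerChar).length with
          | zero => omega
          | succ k => simp [List.take_succ_cons]
        have hsp2 : PySem.Chars.isspace (PySem.Chars.lowerChar w) = true := by
          rw [pvLowerChar_ws w hwsp]; exact hwsp
        have : ∀ c ∈ ".param".toList, PySem.Chars.isspace c = false := by
          intro c hc
          rw [show ".param".toList = ['.','p','a','r','a','m'] from rfl] at hc
          fin_cases hc <;> rfl
        rw [this _ hmem] at hsp2
        exact Bool.false_ne_true hsp2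

theorem pvLine_eq (v : PySem.Dict String String) (line : String) :
    (let stripped := PySem.Str.strip line
     if !(PySem.Str.startswith (PySem.Str.lower stripped) ".param") then v
     else
       let body := PySem.Str.strip (PySem.Str.slice stripped (some 6) none)
       (PySem.Str.split₀ body).foldl (fun values token =>
          if !(PySem.Str.isIn "=" token) then values
          else
            match PySem.Str.splitMax? token "=" 1 with
            | some [name, value] =>
                let name := PySem.Str.strip name
                let value := PySem.Str.strip value
                if name ≠ "" then values.insert name value else values
            | _ => values) v) =
    (let cs := line.toList.dropWhile PySem.Chars.isspace
     if PySem.Chars.lower (cs.take 6) = ".param".toList then pvAltTokens v (cs.drop 6) else v) := by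
  show (if !(PySem.Str.startswith (PySem.Str.lower (PySem.Str.strip line)) ".param") then v
        else ((PySem.Str.split₀ (PySem.Str.strip
            (PySem.Str.slice (PySem.Str.strip line) (some 6) none))).foldl pvStepA v)) = _
  have hA : PySem.Str.startswith (PySem.Str.lower (PySem.Str.strip line)) ".param"
      = PySem.Chars.startswith (PySem.Chars.lower (PySem.Chars.strip line.toList)) ".param".toList := by
    rw [PySem.Str.startswith_eq, PySem.Str.toList_lower, PySem.Str.toList_strip]
  by_cases hcond : PySem.Chars.lower ((line.toList.dropWhile PySem.Chars.isspace).take 6)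
      = ".param".toList
  · have hAcond : PySem.Chars.startswith (PySem.Chars.lower (PySem.Chars.strip line.toList))
        ".param".toList = true := by
      rw [pvCond_eq]; simpa using hcond
    rw [hA, hAcond]
    simp only [Bool.not_true, Bool.false_eq_true, if_false, if_pos hcond]
    -- both sides now run their token loops; show the token lists and the steps agree
    have h6 : 6 ≤ (PySem.Chars.strip line.toList).length := by
      have := ((PySem.Chars.startswith_iff _ _).mp hAcond).length_le
      simpa [PySem.Chars.lower] using this
    -- A's token list
    have hbody : (PySem.Str.strip (PySem.Str.slice (PySem.Str.strip line) (some 6) none)).toList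
        = PySem.Chars.strip ((PySem.Chars.strip line.toList).drop 6) := by
      rw [PySem.Str.toList_strip, PySem.Str.toList_slice, PySem.Str.toList_strip,
        PySem.Chars.slice_eq_listSlice, PySem.List.slice_from _ (by omega : (0:Int) ≤ 6),
        show (6:Int).toNat = 6 from rfl]
    have hSW := pvRstrip_decomp (line.toList.dropWhile PySem.Chars.isspace)
    have hwW : ∀ c ∈ ((line.toList.dropWhile PySem.Chars.isspace).reverse.takeWhile
        PySem.Chars.isspace).reverse, PySem.Chars.isspace c = true := by
      intro c hc
      exact List.mem_takeWhile_imp (by simpa using hc)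
    have hstripL : PySem.Chars.strip line.toList
        = PySem.Chars.rstrip (line.toList.dropWhile PySem.Chars.isspace) := rfl
    have htoks : pvToks ((line.toList.dropWhile PySem.Chars.isspace).drop 6)
        = pvToks ((PySem.Chars.strip line.toList).drop 6) := by
      conv_lhs => rw [← hSW]
      rw [List.drop_append_of_le_length (by rw [← hstripL]; exact h6), ← hstripL,
        pvToks_append_ws _ hwW]
    rw [pvAltTokens_eq_foldl, htoks]
    unfold PySem.Str.split₀
    rw [hbody, pvSplit0_eq, pvToks_strip, List.foldl_map]
    refine PySem.List.foldl_congr_mem _ _ _ _ ?_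
    intro acc tok htok
    exact pvStepA_eq_pvStepB acc tok (pvToks_mem _ tok htok)
  · have hAcond : PySem.Chars.startswith (PySem.Chars.lower (PySem.Chars.strip line.toList))
        ".param".toList = false := by
      rw [pvCond_eq]; simpa using hcond
    rw [hA, hAcond]
    simp only [Bool.not_false, if_true, if_neg hcond]

-- ===== VERDICT (by name: the statement is the Claim_ definition above) =====
theorem parse_param_assignments_spec : Claim_equal_parse_param_assignments := by
  intro t _
  unfold Spec_parse_param_assignments parse_param_assignments parse_param_assignments_alt
  refine congrArg PySem.Dict.items (PySem.List.foldl_congr_mem _ _ _ _ ?_)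
  intro v line _
  exact pvLine_eq v line
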